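-- pv_equiv track=rewrite | github.com/reslp/LFS-cazy-comparative | bin/get_functional_for_cafe_families.py | extract_cazy
-- ===== SOURCE A (Python) =====
-- def extract_cazy(ann_str):
-- 	cazylist = []
-- 	for annot in ann_str.split(";"):
-- 		if "CAZy" in annot:
-- 			for cazy in annot.split(","):
-- 				if "CAZy" in cazy.split(":")[0]:
-- 					cazylist.append(cazy.split(":")[-1])
-- 	return cazylist
-- ===== SOURCE B (Python) =====
-- def extract_cazy(ann_str):
--     # single character-level scan: tokens are flushed at ';' or ',';
--     # per token, the part before the first ':' is checked and the part
--     # after the last ':' emitted, via find/rfind instead of split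
--     out = []
--     tok = []
--     for ch in ann_str + ";":
--         if ch == ";" or ch == ",":
--             t = "".join(tok)
--             tok = []
--             k = t.find(":")
--             head = t if k == -1 else t[:k]
--             if "CAZy" in head:
--                 out.append(t[t.rfind(":") + 1:])
--         else:
--             tok.append(ch)
--     return out
-- ===== Notes on version B (the rewrite author's own statement) =====
-- stated objective: alternative
-- what changed: Replaces the two nested semicolon/comma split loops by a single character-level state machine that flushes tokens at delimiter characters using a sentinel, and replaces the per-token colon-split list indexing by find/rfind slicing; the redundant outer segment-level containment guard disappears.
import Mathlib
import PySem

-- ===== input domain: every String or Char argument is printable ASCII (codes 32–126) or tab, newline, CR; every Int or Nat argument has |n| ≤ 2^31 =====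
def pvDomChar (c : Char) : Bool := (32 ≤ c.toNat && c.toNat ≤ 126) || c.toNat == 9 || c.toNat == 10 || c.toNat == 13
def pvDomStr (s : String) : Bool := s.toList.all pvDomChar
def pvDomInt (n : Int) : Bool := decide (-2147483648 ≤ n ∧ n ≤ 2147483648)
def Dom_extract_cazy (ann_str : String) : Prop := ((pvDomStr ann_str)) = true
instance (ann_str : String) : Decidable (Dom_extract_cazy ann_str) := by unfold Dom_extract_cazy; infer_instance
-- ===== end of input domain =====

-- B replaces the two nested split loops by a single character-level scan that flushes
-- tokens at delimiter characters and uses find/rfind per token instead of split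
-- (objective: alternative).

-- A-side helpers: Python's xs[0] / xs[-1] on a split result (split never returns [])
def pyHead (l : List String) : String := (PySem.List.pyGet? l 0).getD ""
def pyLast (l : List String) : String := (PySem.List.pyGet? l (-1)).getD ""

-- ===== PORT A =====
def extract_cazy (ann_str : String) : List String :=
  ((PySem.Str.split? ann_str ";").getD []).foldl (fun cazylist annot =>
    if PySem.Str.isIn "CAZy" annot then
      ((PySem.Str.split? annot ",").getD []).foldl (fun cl cazy =>
        if PySem.Str.isIn "CAZy" (pyHead ((PySem.Str.split? cazy ":").getD [])) then
          cl ++ [pyLast ((PySem.Str.split? cazy ":").getD [])]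
        else cl) cazylist
    else cazylist) []

-- ===== PORT B =====
-- per-token body of Source B's scanner: find/rfind-based head test and tail extraction
def emitChunk (t : String) : List String :=
  let k := PySem.Str.find t ":"
  let head := if k = -1 then t else PySem.Str.slice t none (some k)
  if PySem.Str.isIn "CAZy" head then
    [PySem.Str.slice t (some (PySem.Str.rfind t ":" + 1)) none]
  else []

-- the Python loop iterates the characters of the input with a sentinel delimiter appended;
-- tok is the pending token's characters, most recent first ('tok.append(ch)' = cons),
-- '"".join(tok)' = String.ofList tok.reverse
def extract_cazy_alt (ann_str : String) : List String :=
  ((ann_str.toList ++ [';']).foldl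
    (fun st ch =>
      if ch = ';' ∨ ch = ',' then
        (st.1 ++ emitChunk (String.ofList st.2.reverse), ([] : List Char))
      else (st.1, ch :: st.2))
    ([], [])).1

-- ===== PRECONDITION & SPEC =====
def Spec_extract_cazy (ann_str : String) (out : List String) : Prop := out = extract_cazy_alt ann_str
instance (ann_str : String) (out : List String) : Decidable (Spec_extract_cazy ann_str out) := by unfold Spec_extract_cazy; infer_instance

-- ===== CLAIM (what is proved, stated in full; the proofs are below) =====
def Claim_equal_extract_cazy : Prop := ∀ (ann_str : String), Dom_extract_cazy ann_str → Spec_extract_cazy ann_str (extract_cazy ann_str)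

-- ===== LEMMAS AND PROOFS =====

-- ---------- A-side: outer "CAZy in annot" guard is redundant ----------

lemma splitOn_go_infix (sep : List Char) :
    ∀ (fuel : Nat) (l cur : List Char) (acc : List (List Char)) (s : List Char),
      (∀ a ∈ acc, a <:+: s) → (cur.reverse ++ l) <:+: s →
      ∀ t ∈ PySem.Chars.splitOn.go sep fuel l cur acc, t <:+: s := by
  intro fuel
  induction fuel with
  | zero =>
    intro l cur acc s hacc hcl t ht
    simp only [PySem.Chars.splitOn.go] at ht
    simp only [List.mem_reverse, List.mem_cons] at ht
    rcases ht with h | h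
    · subst h; exact hcl
    · exact hacc t h
  | succ fuel ih =>
    intro l cur acc s hacc hcl t ht
    cases l with
    | nil =>
      simp only [PySem.Chars.splitOn.go] at ht
      simp only [List.mem_reverse, List.mem_cons] at ht
      rcases ht with h | h
      · subst h
        exact List.IsInfix.trans (by simpa using (List.prefix_append cur.reverse ([] : List Char)).isInfix) hcl
      · exact hacc t h
    | cons c rest =>
      simp only [PySem.Chars.splitOn.go] at ht
      split at ht
      · refine ih _ [] (cur.reverse :: acc) s ?_ ?_ t ht
        · intro a ha
          rcases List.mem_cons.mp ha with h | h
          · subst h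
            exact List.IsInfix.trans (List.prefix_append cur.reverse (c :: rest)).isInfix hcl
          · exact hacc a h
        · simpa using List.IsInfix.trans ((List.drop_suffix sep.length (c :: rest)).isInfix.trans
            (List.suffix_append cur.reverse (c :: rest)).isInfix) hcl
      · refine ih rest (c :: cur) acc s hacc ?_ t ht
        simpa using hcl

lemma mem_splitOn_infix (s sep : List Char) :
    ∀ t ∈ PySem.Chars.splitOn s sep, t <:+: s := by
  intro t ht
  exact splitOn_go_infix sep (s.length + 1) s [] [] s (by simp) (by simp) t ht

lemma splitOn_go_ne_nil (sep : List Char) :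
    ∀ (fuel : Nat) (l cur : List Char) (acc : List (List Char)),
      PySem.Chars.splitOn.go sep fuel l cur acc ≠ [] := by
  intro fuel
  induction fuel with
  | zero => intro l cur acc; simp [PySem.Chars.splitOn.go]
  | succ fuel ih =>
    intro l cur acc
    cases l with
    | nil => simp [PySem.Chars.splitOn.go]
    | cons c rest =>
      simp only [PySem.Chars.splitOn.go]
      split
      · exact ih _ _ _
      · exact ih _ _ _

lemma splitOn_ne_nil (s sep : List Char) : PySem.Chars.splitOn s sep ≠ [] :=
  splitOn_go_ne_nil sep (s.length + 1) s [] []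

-- the per-token predicate and value of A's inner loop
def tokP (t : String) : Bool :=
  PySem.Str.isIn "CAZy" (pyHead ((PySem.Str.split? t ":").getD []))

def tokG (t : String) : String := pyLast ((PySem.Str.split? t ":").getD [])

lemma tokP_infix (t : String) (h : tokP t = true) : "CAZy".toList <:+: t.toList := by
  unfold tokP at h
  have hsplit : (PySem.Str.split? t ":").getD []
      = (PySem.Chars.splitOn t.toList [':']).map String.ofList := by
    simp [PySem.Str.split?, PySem.Chars.split?]
  rw [hsplit] at h
  rcases hh : PySem.Chars.splitOn t.toList [':'] with _ | ⟨hd, tl⟩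
  · exact absurd hh (splitOn_ne_nil _ _)
  · rw [hh] at h
    simp only [pyHead, List.map_cons] at h
    have hget : PySem.List.pyGet? (String.ofList hd :: tl.map String.ofList) (0 : Int)
        = some (String.ofList hd) := by
      have := PySem.List.pyGet?_natCast (String.ofList hd :: tl.map String.ofList) 0
      simpa using this
    rw [hget] at h
    simp only [Option.getD_some, PySem.Str.isIn_eq] at h
    have hinf : "CAZy".toList <:+: (String.ofList hd).toList :=
      (PySem.Chars.isIn_iff_infix _ _).mp h
    have hd_inf : hd <:+: t.toList := mem_splitOn_infix _ _ hd (hh ▸ List.mem_cons_self ..)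
    exact List.IsInfix.trans (by simpa using hinf) hd_inf

lemma seg_false (seg : String) (h : PySem.Str.isIn "CAZy" seg = false) :
    ∀ t ∈ (PySem.Str.split? seg ",").getD [], tokP t = false := by
  intro t ht
  by_contra hne
  have hP : tokP t = true := by
    cases htp : tokP t
    · exact absurd htp hne
    · rfl
  have hsplit : (PySem.Str.split? seg ",").getD []
      = (PySem.Chars.splitOn seg.toList [',']).map String.ofList := by
    simp [PySem.Str.split?, PySem.Chars.split?]
  rw [hsplit] at ht
  rcases List.mem_map.mp ht with ⟨l, hl, rfl⟩
  have h1 : "CAZy".toList <:+: (String.ofList l).toList := tokP_infix _ hP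
  have h2 : l <:+: seg.toList := mem_splitOn_infix _ _ l hl
  have : PySem.Chars.isIn "CAZy".toList seg.toList = true :=
    (PySem.Chars.isIn_iff_infix _ _).mpr (List.IsInfix.trans (by simpa using h1) h2)
  rw [PySem.Str.isIn_eq] at h
  rw [h] at this
  exact Bool.false_ne_true this

def segF (seg : String) : List String :=
  (((PySem.Str.split? seg ",").getD []).filter tokP).map tokG

lemma inner_eq (seg : String) (acc : List String) :
    ((PySem.Str.split? seg ",").getD []).foldl (fun cl cazy =>
        if PySem.Str.isIn "CAZy" (pyHead ((PySem.Str.split? cazy ":").getD [])) then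
          cl ++ [pyLast ((PySem.Str.split? cazy ":").getD [])]
        else cl) acc = acc ++ segF seg := by
  simpa [segF, tokP, tokG] using
    PySem.List.foldl_append_if tokP tokG ((PySem.Str.split? seg ",").getD []) acc

-- ---------- single-character split as a structural recursion ----------

def splitChar (c : Char) : List Char → List (List Char)
  | [] => [[]]
  | x :: xs => if x = c then [] :: splitChar c xs else (splitChar c xs).modifyHead (x :: ·)

lemma splitChar_ne_nil (c : Char) (t : List Char) : splitChar c t ≠ [] := by
  induction t with
  | nil => simp [splitChar]
  | cons x xs ih =>
    simp only [splitChar]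
    split
    · simp
    · cases h : splitChar c xs with
      | nil => exact absurd h ih
      | cons a l => simp

lemma modifyHead_id' {α : Type} (l : List α) : l.modifyHead (fun a => a) = l := by
  cases l <;> simp

lemma modifyHead_ext {α : Type} (f g : α → α) (l : List α) (h : ∀ a, f a = g a) :
    l.modifyHead f = l.modifyHead g := by
  cases l <;> simp [h]

lemma go_single (c : Char) :
    ∀ (fuel : Nat) (l cur : List Char) (acc : List (List Char)), l.length < fuel →
      PySem.Chars.splitOn.go [c] fuel l cur acc
        = acc.reverse ++ (splitChar c l).modifyHead (cur.reverse ++ ·) := by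
  intro fuel
  induction fuel with
  | zero => intro l cur acc h; omega
  | succ fuel ih =>
    intro l cur acc h
    cases l with
    | nil => simp [PySem.Chars.splitOn.go, splitChar]
    | cons x rest =>
      simp only [PySem.Chars.splitOn.go]
      by_cases hx : x = c
      · subst hx
        have hpre : [x].isPrefixOf (x :: rest) = true := by simp [List.isPrefixOf]
        rw [if_pos hpre]
        rw [ih _ [] _ (by simp at h ⊢; omega)]
        simp [splitChar, modifyHead_id']
      · have hpre : [c].isPrefixOf (x :: rest) = false := by
          simp [List.isPrefixOf]
          exact fun hh => absurd hh.symm hx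
        rw [if_neg (by simp [hpre])]
        rw [ih rest (x :: cur) acc (by simp at h ⊢; omega)]
        simp only [splitChar, if_neg hx, List.modifyHead_modifyHead]
        congr 1
        apply modifyHead_ext
        intro a
        simp


lemma splitOn_single (c : Char) (t : List Char) :
    PySem.Chars.splitOn t [c] = splitChar c t := by
  rw [PySem.Chars.splitOn, go_single c _ _ _ _ (by omega)]
  simp [modifyHead_id']


lemma splitChar_head (c : Char) (t : List Char) :
    (splitChar c t).headD [] = t.takeWhile (· != c) := by
  induction t with
  | nil => simp [splitChar]
  | cons x xs ih =>
    by_cases hx : x = c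
    · subst hx; simp [splitChar, List.takeWhile_cons]
    · cases h : splitChar c xs with
      | nil => exact absurd h (splitChar_ne_nil c xs)
      | cons a l =>
        rw [h] at ih
        simp only [splitChar, if_neg hx, h, List.modifyHead_cons, List.headD_cons,
          List.takeWhile_cons]
        simp only [List.headD_cons] at ih
        simp [bne_iff_ne, hx, ih]


lemma splitChar_of_not_mem (c : Char) (t : List Char) (h : c ∉ t) : splitChar c t = [t] := by
  induction t with
  | nil => simp [splitChar]
  | cons x xs ih =>
    have hx : x ≠ c := fun hh => h (hh ▸ List.mem_cons_self ..)
    have hxs : c ∉ xs := fun hh => h (List.mem_cons_of_mem _ hh)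
    simp [splitChar, if_neg hx, ih hxs]


lemma one_lt_length_splitChar (c : Char) (t : List Char) (h : c ∈ t) :
    1 < (splitChar c t).length := by
  induction t with
  | nil => simp at h
  | cons x xs ih =>
    by_cases hx : x = c
    · subst hx
      have := List.length_pos_iff.mpr (splitChar_ne_nil x xs)
      simp only [splitChar, decide_true, if_true, List.length_cons]
      omega
    · have hxs : c ∈ xs := by
        rcases List.mem_cons.mp h with h1 | h1
        · exact absurd h1.symm hx
        · exact h1
      simpa [splitChar, if_neg hx] using ih hxs


lemma takeWhile_eq_self_of_forall {α : Type} (p : α → Bool) (l : List α)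
    (h : ∀ a ∈ l, p a = true) : l.takeWhile p = l := by
  induction l with
  | nil => rfl
  | cons x xs ih =>
    rw [List.takeWhile_cons, if_pos (h x (List.mem_cons_self ..))]
    simp [ih (fun a ha => h a (List.mem_cons_of_mem _ ha))]

lemma takeWhile_ne_self_of_mem (c : Char) (l : List Char) (h : c ∈ l) :
    l.takeWhile (· != c) ≠ l := by
  intro he
  have := List.mem_takeWhile_imp (he ▸ h)
  simp at this

lemma splitChar_last (c : Char) (t : List Char) :
    (splitChar c t).getLastD [] = (t.reverse.takeWhile (· != c)).reverse := by
  induction t with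
  | nil => simp [splitChar]
  | cons x xs ih =>
    by_cases hx : x = c
    · subst hx
      -- head piece [] prepended; last unchanged
      have hne := splitChar_ne_nil x xs
      rcases hS : splitChar x xs with _ | ⟨g, gs⟩
      · exact absurd hS hne
      rw [hS] at ih
      simp only [splitChar, decide_true, if_true, hS, List.getLastD_cons]
      rw [List.reverse_cons, List.takeWhile_append]
      have hgl : (g :: gs).getLastD [] = (xs.reverse.takeWhile (· != x)).reverse := ih
      by_cases hlen : (xs.reverse.takeWhile (· != x)).length = xs.reverse.length
      · rw [if_pos hlen]
        have hwhole : xs.reverse.takeWhile (· != x) = xs.reverse :=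
          (List.takeWhile_prefix _).eq_of_length hlen
        rw [List.getLastD_cons] at hgl
        rw [hgl, hwhole]
        simp
      · rw [if_neg hlen]
        rw [List.getLastD_cons] at hgl
        exact hgl
    · by_cases hc : c ∈ xs
      · have h2 := one_lt_length_splitChar c xs hc
        rcases hS : splitChar c xs with _ | ⟨g, gs⟩
        · exact absurd hS (splitChar_ne_nil c xs)
        rcases gs with _ | ⟨g2, gs2⟩
        · rw [hS] at h2; simp at h2
        rw [hS] at ih
        simp only [splitChar, if_neg hx, hS, List.modifyHead_cons, List.getLastD_cons]
        rw [List.reverse_cons, List.takeWhile_append]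
        have hlen : ¬ (xs.reverse.takeWhile (· != c)).length = xs.reverse.length := by
          intro he
          have : xs.reverse.takeWhile (· != c) = xs.reverse :=
            (List.takeWhile_prefix _).eq_of_length he
          exact takeWhile_ne_self_of_mem c xs.reverse (List.mem_reverse.mpr hc) this
        rw [if_neg hlen]
        simp only [List.getLastD_cons] at ih
        exact ih
      · rw [splitChar_of_not_mem c xs hc] at ih
        simp only [splitChar, if_neg hx, splitChar_of_not_mem c xs hc, List.modifyHead_cons,
          List.getLastD_cons]
        rw [List.reverse_cons, List.takeWhile_append]
        have hall : xs.reverse.takeWhile (· != c) = xs.reverse :=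
          takeWhile_eq_self_of_forall _ _ (fun a ha => by
            simp only [bne_iff_ne, ne_eq, decide_eq_true_eq]
            intro hac
            exact hc (List.mem_reverse.mp (hac ▸ ha)))
        rw [if_pos (by rw [hall])]
        have hpx : (· != c) x = true := by simp [bne_iff_ne, hx]
        simp [List.takeWhile_cons, hpx]


-- ---------- find / rfind characterised by takeWhile ----------

lemma fgo_nil (sub : List Char) (k : Nat) :
    PySem.Chars.find.go sub [] k = if sub.isEmpty = true then (k : Int) else -1 := by
  conv_lhs => rw [PySem.Chars.find.go]

lemma fgo_cons (sub : List Char) (y : Char) (ys : List Char) (k : Nat) :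
    PySem.Chars.find.go sub (y :: ys) k
      = if sub.isPrefixOf (y :: ys) = true then (k : Int)
        else PySem.Chars.find.go sub ys (k + 1) := by
  conv_lhs => rw [PySem.Chars.find.go]

lemma rgo_zero (s sub : List Char) :
    PySem.Chars.rfind.go s sub 0 = if sub.isPrefixOf s = true then 0 else -1 := by
  conv_lhs => rw [PySem.Chars.rfind.go]

lemma rgo_succ (s sub : List Char) (j : Nat) :
    PySem.Chars.rfind.go s sub (j + 1)
      = if sub.isPrefixOf (s.drop (j + 1)) = true then ((j : Int) + 1)
        else PySem.Chars.rfind.go s sub j := by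
  conv_lhs => rw [PySem.Chars.rfind.go]
  norm_num

lemma find_go_shift (c : Char) :
    ∀ (l : List Char) (k : Nat),
      PySem.Chars.find.go [c] l k
        = if PySem.Chars.find.go [c] l 0 = -1 then -1 else PySem.Chars.find.go [c] l 0 + k := by
  intro l
  induction l with
  | nil => intro k; simp [fgo_nil]
  | cons y ys ih =>
    intro k
    by_cases hp : [c].isPrefixOf (y :: ys) = true
    · simp [fgo_cons, hp]
    · rw [fgo_cons, fgo_cons, if_neg hp, if_neg hp, ih (k + 1), ih 1]
      have hge : (-1 : Int) ≤ PySem.Chars.find.go [c] ys 0 := by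
        have := PySem.Chars.neg_one_le_find ys [c]
        simpa [PySem.Chars.find] using this
      split_ifs with h1 h2 h3 <;> push_cast <;> omega


lemma find_nil (c : Char) : PySem.Chars.find [] [c] = -1 := by
  simp [PySem.Chars.find, fgo_nil]

lemma find_cons (c x : Char) (xs : List Char) :
    PySem.Chars.find (x :: xs) [c]
      = if x = c then 0 else
          (if PySem.Chars.find xs [c] = -1 then -1 else PySem.Chars.find xs [c] + 1) := by
  by_cases hx : x = c
  · subst hx
    simp [PySem.Chars.find, fgo_cons, List.isPrefixOf]
  · have hp : [c].isPrefixOf (x :: xs) = false := by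
      simp [List.isPrefixOf]
      exact fun hh => absurd hh.symm hx
    rw [PySem.Chars.find, fgo_cons, if_neg (by simp [hp]), if_neg hx]
    rw [show PySem.Chars.find xs [c] = PySem.Chars.find.go [c] xs 0 from rfl]
    rw [find_go_shift c xs 1]
    norm_num


lemma find_take (c : Char) (t : List Char) :
    (if PySem.Chars.find t [c] = -1 then t else t.take (PySem.Chars.find t [c]).toNat)
      = t.takeWhile (· != c) := by
  induction t with
  | nil => simp [find_nil]
  | cons x xs ih =>
    rw [find_cons]
    by_cases hx : x = c
    · subst hx
      simp [List.takeWhile_cons]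
    · rw [if_neg hx]
      have hpx : (x != c) = true := by simp [bne_iff_ne, hx]
      by_cases h0 : PySem.Chars.find xs [c] = -1
      · rw [if_pos (by simp [h0])]
        rw [if_pos h0] at ih
        rw [List.takeWhile_cons, if_pos hpx, ← ih]
      · have hge : 0 ≤ PySem.Chars.find xs [c] := by
          have := PySem.Chars.neg_one_le_find xs [c]
          omega
        rw [if_neg h0] at ih
        rw [if_neg (by simp [h0]; omega), if_neg h0]
        have harith : ((PySem.Chars.find xs [c] + 1).toNat) = (PySem.Chars.find xs [c]).toNat + 1 := by
          omega
        rw [harith, List.take_succ_cons, List.takeWhile_cons, if_pos hpx, ih]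


lemma rfind_go_cons (c x : Char) (xs : List Char) :
    ∀ (m : Nat),
      PySem.Chars.rfind.go (x :: xs) [c] (m + 1)
        = if PySem.Chars.rfind.go xs [c] m = -1 then (if x = c then 0 else -1)
          else PySem.Chars.rfind.go xs [c] m + 1 := by
  intro m
  induction m with
  | zero =>
    rw [rgo_succ, rgo_zero, rgo_zero]
    rw [show List.drop (0 + 1) (x :: xs) = xs from rfl]
    by_cases hp : [c].isPrefixOf xs = true
    · rw [if_pos hp, if_pos hp]
      norm_num
    · rw [if_neg hp, if_neg hp]
      by_cases hx : x = c
      · subst hx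
        rw [if_pos (by simp [List.isPrefixOf]), if_pos rfl, if_pos rfl]
      · rw [if_neg (by simp [List.isPrefixOf]; exact fun hh => absurd hh.symm hx),
            if_pos rfl, if_neg hx]
  | succ m ih =>
    rw [rgo_succ (x :: xs) [c] (m + 1), rgo_succ xs [c] m]
    rw [show List.drop (m + 1 + 1) (x :: xs) = List.drop (m + 1) xs from rfl]
    by_cases hp : [c].isPrefixOf (List.drop (m + 1) xs) = true
    · rw [if_pos hp, if_pos hp, if_neg (by push_cast; omega)]
      push_cast
      ring
    · rw [if_neg hp, if_neg hp]
      exact ih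


lemma rfind_nil (c : Char) : PySem.Chars.rfind [] [c] = -1 := by
  rw [PySem.Chars.rfind, show ([] : List Char).length = 0 from rfl, rgo_zero]
  simp [List.isPrefixOf]


lemma rfind_cons (c x : Char) (xs : List Char) :
    PySem.Chars.rfind (x :: xs) [c]
      = if PySem.Chars.rfind xs [c] = -1 then (if x = c then 0 else -1)
        else PySem.Chars.rfind xs [c] + 1 := by
  rw [PySem.Chars.rfind, PySem.Chars.rfind, show (x :: xs).length = xs.length + 1 from rfl]
  exact rfind_go_cons c x xs xs.length


lemma rfind_ge (c : Char) (t : List Char) : -1 ≤ PySem.Chars.rfind t [c] := by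
  induction t with
  | nil => rw [rfind_nil]
  | cons x xs ih =>
    rw [rfind_cons]
    by_cases h0 : PySem.Chars.rfind xs [c] = -1
    · rw [if_pos h0]; split <;> omega
    · rw [if_neg h0]; omega


lemma rfind_drop (c : Char) (t : List Char) :
    t.drop (PySem.Chars.rfind t [c] + 1).toNat = (t.reverse.takeWhile (· != c)).reverse := by
  induction t with
  | nil => simp [rfind_nil]
  | cons x xs ih =>
    rw [rfind_cons]
    by_cases h0 : PySem.Chars.rfind xs [c] = -1
    · rw [if_pos h0]
      rw [h0] at ih
      simp only [show ((-1 : Int) + 1).toNat = 0 from rfl, List.drop_zero] at ih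
      have hwr : xs.reverse.takeWhile (· != c) = xs.reverse := by
        have := congrArg List.reverse ih
        simpa using this.symm
      by_cases hx : x = c
      · subst hx
        rw [if_pos rfl]
        rw [List.reverse_cons, List.takeWhile_append, if_pos (by rw [hwr])]
        simp
      · rw [if_neg hx]
        rw [List.reverse_cons, List.takeWhile_append, if_pos (by rw [hwr])]
        have hpx : (x != c) = true := by simp [bne_iff_ne, hx]
        simp [List.takeWhile_cons, hpx, hwr]
    · have hge : 0 ≤ PySem.Chars.rfind xs [c] := by
        have := rfind_ge c xs
        omega
      rw [if_neg h0]
      have hxs_ne : xs ≠ [] := by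
        intro he
        rw [he, rfind_nil] at h0
        exact h0 rfl
      have harith : ((PySem.Chars.rfind xs [c] + 1) + 1).toNat
          = (PySem.Chars.rfind xs [c] + 1).toNat + 1 := by omega
      rw [harith, List.drop_succ_cons, ih]
      rw [List.reverse_cons, List.takeWhile_append]
      have hlt : (xs.reverse.takeWhile (· != c)).length ≠ xs.reverse.length := by
        have hlen := congrArg List.length ih
        simp only [List.length_drop, List.length_reverse] at hlen
        have h1 : 1 ≤ (PySem.Chars.rfind xs [c] + 1).toNat := by omega
        have h2 : 0 < xs.length := List.length_pos_iff.mpr hxs_ne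
        simp only [List.length_reverse]
        omega
      rw [if_neg hlt]


-- ---------- the per-token bodies agree ----------

lemma pyHead_split (t : String) :
    pyHead ((PySem.Str.split? t ":").getD []) = String.ofList (t.toList.takeWhile (· != ':')) := by
  have hsplit : (PySem.Str.split? t ":").getD []
      = (PySem.Chars.splitOn t.toList [':']).map String.ofList := by
    simp [PySem.Str.split?, PySem.Chars.split?]
  rw [hsplit, splitOn_single]
  rcases h : splitChar ':' t.toList with _ | ⟨hd, tl⟩
  · exact absurd h (splitChar_ne_nil _ _)
  · have hhd : hd = t.toList.takeWhile (· != ':') := by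
      have := splitChar_head ':' t.toList
      rw [h] at this
      simpa using this
    simp only [pyHead, List.map_cons]
    have hget : PySem.List.pyGet? (String.ofList hd :: tl.map String.ofList) (0 : Int)
        = some (String.ofList hd) := by
      have := PySem.List.pyGet?_natCast (String.ofList hd :: tl.map String.ofList) 0
      simpa using this
    rw [hget, Option.getD_some, hhd]

lemma pyGet_neg_one {α : Type} (l : List α) (d : α) (h : l ≠ []) :
    PySem.List.pyGet? l (-1) = some (l.getLastD d) := by
  simp only [PySem.List.pyGet?, PySem.List.pyIdx?]
  have hpos : 1 ≤ l.length := by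
    cases l with
    | nil => exact absurd rfl h
    | cons a as => simp
  norm_num
  rw [if_pos (by exact_mod_cast hpos)]
  simp only [Option.bind_some]
  rw [List.getElem?_eq_getElem (by omega)]
  rw [List.getLast?_eq_getElem?, List.getElem?_eq_getElem (by omega)]
  simp

lemma pyLast_split (t : String) :
    pyLast ((PySem.Str.split? t ":").getD [])
      = String.ofList ((t.toList.reverse.takeWhile (· != ':')).reverse) := by
  have hsplit : (PySem.Str.split? t ":").getD []
      = (PySem.Chars.splitOn t.toList [':']).map String.ofList := by
    simp [PySem.Str.split?, PySem.Chars.split?]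
  rw [hsplit, splitOn_single]
  rcases h : splitChar ':' t.toList with _ | ⟨hd, tl⟩
  · exact absurd h (splitChar_ne_nil _ _)
  · have hlast : (hd :: tl).getLastD [] = (t.toList.reverse.takeWhile (· != ':')).reverse := by
      have := splitChar_last ':' t.toList
      rw [h] at this
      exact this
    rw [pyLast, pyGet_neg_one (((hd :: tl)).map String.ofList) "" (by simp), Option.getD_some]
    have : ((hd :: tl).map String.ofList).getLastD "" = String.ofList ((hd :: tl).getLastD []) := by
      rcases he : (hd :: tl).getLast? with _ | g
      · simp at he
      · have hmap : ((hd :: tl).map String.ofList).getLast? = some (String.ofList g) := by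
          rw [List.getLast?_map, he, Option.map_some]
        rw [List.getLastD_eq_getLast?, List.getLastD_eq_getLast?, he, hmap]
        rfl
    rw [this, hlast]

lemma emit_eq (t : String) : emitChunk t = if tokP t then [tokG t] else [] := by
  have hfind : PySem.Str.find t ":" = PySem.Chars.find t.toList [':'] := rfl
  have hrfind : PySem.Str.rfind t ":" = PySem.Chars.rfind t.toList [':'] := rfl
  have hhead :
      (if PySem.Str.find t ":" = -1 then t
       else PySem.Str.slice t none (some (PySem.Str.find t ":")))
        = String.ofList (t.toList.takeWhile (· != ':')) := by
    rw [hfind]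
    by_cases h0 : PySem.Chars.find t.toList [':'] = -1
    · rw [if_pos h0]
      have := find_take ':' t.toList
      rw [if_pos h0] at this
      rw [← this]
      exact String.ofList_toList.symm
    · have hge : 0 ≤ PySem.Chars.find t.toList [':'] := by
        have := PySem.Chars.neg_one_le_find t.toList [':']
        omega
      rw [if_neg h0]
      have := find_take ':' t.toList
      rw [if_neg h0] at this
      rw [PySem.Str.slice, PySem.Chars.slice, PySem.List.slice_to _ hge, this]
  have hcond : tokP t = PySem.Str.isIn "CAZy"
      (if PySem.Str.find t ":" = -1 then t
       else PySem.Str.slice t none (some (PySem.Str.find t ":"))) := by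
    rw [hhead, tokP, pyHead_split]
  have hval : PySem.Str.slice t (some (PySem.Str.rfind t ":" + 1)) none = tokG t := by
    rw [hrfind, PySem.Str.slice, PySem.Chars.slice,
      PySem.List.slice_from _ (by have := rfind_ge ':' t.toList; omega),
      rfind_drop, tokG, pyLast_split]
  rw [emitChunk]
  simp only [← hcond, hval]

-- ---------- tokenisation: nested splits = one scan ----------

def tokChar : List Char → List (List Char)
  | [] => [[]]
  | x :: xs => if x = ';' ∨ x = ',' then [] :: tokChar xs else (tokChar xs).modifyHead (x :: ·)

lemma tokChar_ne_nil (t : List Char) : tokChar t ≠ [] := by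
  induction t with
  | nil => simp [tokChar]
  | cons x xs ih =>
    simp only [tokChar]
    split
    · simp
    · cases h : tokChar xs with
      | nil => exact absurd h ih
      | cons a l => simp

lemma modifyHead_append_ne_nil {α : Type} (f : α → α) (l r : List α) (h : l ≠ []) :
    (l ++ r).modifyHead f = l.modifyHead f ++ r := by
  cases l with
  | nil => exact absurd rfl h
  | cons a as => simp

lemma tokChar_eq : ∀ l : List Char,
    (splitChar ';' l).flatMap (fun p => splitChar ',' p) = tokChar l := by
  intro l
  induction l with
  | nil => simp [splitChar, tokChar]
  | cons x xs ih =>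
    by_cases h1 : x = ';'
    · subst h1
      simp only [splitChar, decide_true, if_true, List.flatMap_cons, tokChar, true_or, if_pos]
      rw [← ih]
      rfl
    · by_cases h2 : x = ','
      · subst h2
        rcases hS : splitChar ';' xs with _ | ⟨g, T⟩
        · exact absurd hS (splitChar_ne_nil _ _)
        rw [hS] at ih
        have hxne : (',' : Char) ≠ ';' := by decide
        simp only [splitChar, if_neg hxne, hS, List.modifyHead_cons, List.flatMap_cons,
          tokChar, or_true, if_true]
        rw [← ih]
        simp
      · rcases hS : splitChar ';' xs with _ | ⟨g, T⟩
        · exact absurd hS (splitChar_ne_nil _ _)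
        rw [hS] at ih
        have hnd : ¬ (x = ';' ∨ x = ',') := by tauto
        simp only [splitChar, if_neg h1, hS, List.modifyHead_cons, List.flatMap_cons,
          tokChar, if_neg hnd]
        rw [← ih]
        simp only [List.flatMap_cons]
        rw [if_neg h2, modifyHead_append_ne_nil _ _ _ (splitChar_ne_nil ',' g)]

lemma tokChar_concat_delim (l : List Char) : tokChar (l ++ [';']) = tokChar l ++ [[]] := by
  induction l with
  | nil => simp [tokChar]
  | cons x xs ih =>
    by_cases hd : x = ';' ∨ x = ','
    · simp only [List.cons_append, tokChar, if_pos hd, ih]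
    · simp only [List.cons_append, tokChar, if_neg hd, ih]
      exact modifyHead_append_ne_nil _ _ _ (tokChar_ne_nil xs)

lemma scan_fold : ∀ (l : List Char) (res : List String) (tok : List Char),
    l.foldl
      (fun st ch =>
        if ch = ';' ∨ ch = ',' then
          (st.1 ++ emitChunk (String.ofList st.2.reverse), ([] : List Char))
        else (st.1, ch :: st.2)) (res, tok)
    = (res ++ (((tokChar l).modifyHead (tok.reverse ++ ·)).dropLast).flatMap
          (fun tl => emitChunk (String.ofList tl)),
       ((((tokChar l).modifyHead (tok.reverse ++ ·)).getLastD []).reverse)) := by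
  intro l
  induction l with
  | nil =>
    intro res tok
    simp [tokChar]
  | cons x xs ih =>
    intro res tok
    rw [List.foldl_cons]
    by_cases hd : x = ';' ∨ x = ','
    · rw [if_pos hd, ih (res ++ emitChunk (String.ofList tok.reverse)) []]
      rcases hT : tokChar xs with _ | ⟨t0, ts⟩
      · exact absurd hT (tokChar_ne_nil xs)
      simp only [tokChar, if_pos hd, hT, List.modifyHead_cons, List.reverse_nil,
        List.nil_append, List.append_nil, List.dropLast_cons_of_ne_nil (List.cons_ne_nil t0 ts),
        List.flatMap_cons, List.getLastD_cons]
      rw [List.append_assoc]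
    · rw [if_neg hd, ih res (x :: tok)]
      rcases hT : tokChar xs with _ | ⟨t0, ts⟩
      · exact absurd hT (tokChar_ne_nil xs)
      simp only [tokChar, if_neg hd, hT, List.modifyHead_cons, List.reverse_cons]
      rw [List.append_assoc]
      simp

lemma alt_eq (s : String) :
    extract_cazy_alt s = (tokChar s.toList).flatMap (fun tl => emitChunk (String.ofList tl)) := by
  unfold extract_cazy_alt
  rw [scan_fold (s.toList ++ [';']) [] []]
  simp only [List.reverse_nil]
  rw [show List.modifyHead (fun x => ([] : List Char) ++ x) (tokChar (s.toList ++ [';']))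
        = tokChar (s.toList ++ [';']) from by
      rw [modifyHead_ext (fun x => ([] : List Char) ++ x) (fun a => a) _ (fun a => by simp), modifyHead_id']]
  rw [tokChar_concat_delim, List.dropLast_concat]
  simp

-- ---------- assembling A ----------

lemma filter_map_flatMap {α β : Type} (p : α → Bool) (f : α → β) (l : List α) :
    (l.filter p).map f = l.flatMap (fun x => if p x then [f x] else []) := by
  induction l with
  | nil => rfl
  | cons x xs ih =>
    by_cases h : p x = true
    · simp [h, ih]
    · simp [h, ih, Bool.eq_false_iff.mpr h]

lemma a_eq (s : String) :
    extract_cazy s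
      = ((splitChar ';' s.toList).flatMap (fun p => splitChar ',' p)).flatMap
          (fun tl => if tokP (String.ofList tl) then [tokG (String.ofList tl)] else []) := by
  unfold extract_cazy
  have hstep : ∀ (acc : List String) (annot : String),
      (if PySem.Str.isIn "CAZy" annot then
        ((PySem.Str.split? annot ",").getD []).foldl (fun cl cazy =>
          if PySem.Str.isIn "CAZy" (pyHead ((PySem.Str.split? cazy ":").getD [])) then
            cl ++ [pyLast ((PySem.Str.split? cazy ":").getD [])]
          else cl) acc
      else acc) = acc ++ segF annot := by
    intro acc annot
    cases hin : PySem.Str.isIn "CAZy" annot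
    · have : segF annot = [] := by
        unfold segF
        rw [List.filter_eq_nil_iff.mpr ?_]
        · simp
        · intro t ht
          simp [seg_false annot hin t ht]
      simp [this]
    · simpa using inner_eq annot acc
  have h1 : ((PySem.Str.split? s ";").getD []).foldl (fun cazylist annot =>
        if PySem.Str.isIn "CAZy" annot then
          ((PySem.Str.split? annot ",").getD []).foldl (fun cl cazy =>
            if PySem.Str.isIn "CAZy" (pyHead ((PySem.Str.split? cazy ":").getD [])) then
              cl ++ [pyLast ((PySem.Str.split? cazy ":").getD [])]
            else cl) cazylist
        else cazylist) []
      = ((PySem.Str.split? s ";").getD []).flatMap segF := by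
    calc _ = ((PySem.Str.split? s ";").getD []).foldl (fun acc annot => acc ++ segF annot) [] :=
          PySem.List.foldl_congr_mem _ _ _ _ (fun acc annot _ => hstep acc annot)
      _ = _ := by
          simpa using PySem.List.foldl_append_eq_flatMap segF ((PySem.Str.split? s ";").getD []) []
  rw [h1]
  have hsplit : (PySem.Str.split? s ";").getD []
      = (PySem.Chars.splitOn s.toList [';']).map String.ofList := by
    simp [PySem.Str.split?, PySem.Chars.split?]
  rw [hsplit, splitOn_single, List.flatMap_map]
  have hseg : ∀ p : List Char, segF (String.ofList p)
      = (splitChar ',' p).flatMap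
          (fun tl => if tokP (String.ofList tl) then [tokG (String.ofList tl)] else []) := by
    intro p
    unfold segF
    have hsplit2 : (PySem.Str.split? (String.ofList p) ",").getD []
        = (PySem.Chars.splitOn p [',']).map String.ofList := by
      simp [PySem.Str.split?, PySem.Chars.split?]
    rw [hsplit2, splitOn_single, List.filter_map, List.map_map, filter_map_flatMap]
    rfl
  calc (splitChar ';' s.toList).flatMap (fun p => segF (String.ofList p))
      = (splitChar ';' s.toList).flatMap (fun p => (splitChar ',' p).flatMap
          (fun tl => if tokP (String.ofList tl) then [tokG (String.ofList tl)] else [])) := by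
        exact List.flatMap_congr (fun p _ => hseg p)
    _ = _ := by
        rw [List.flatMap_assoc]

-- ===== VERDICT (by name: the statement is the Claim_ definition above) =====
set_option maxHeartbeats 1000000 in
theorem extract_cazy_spec : Claim_equal_extract_cazy := by
  intro ann_str _
  unfold Spec_extract_cazy
  rw [a_eq, alt_eq, tokChar_eq]
  refine (List.flatMap_congr ?_).symm
  intro tl _
  exact emit_eq (String.ofList tl)
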